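-- pv_equiv track=rewrite | github.com/Fortunoxx/AdventOfCode2021 | src/day17.py | calcX
-- ===== SOURCE A (Python) =====
-- def calcX(velocity, iteration):
--     x = 0
--     i = velocity[0]
--     for _ in range(iteration):
--         x += i
--         if i > 0:
--             i -= 1
--     return x
-- ===== SOURCE B (Python) =====
-- def calcX(velocity, iteration):
--     v = velocity[0]
--     n = iteration if iteration > 0 else 0
--     if v <= 0:
--         return v * n
--     m = n if n < v else v
--     return m * v - m * (m - 1) // 2
-- ===== Notes on version B (the rewrite author's own statement) =====
-- stated objective: alternative
-- what changed: Replaces the per-step simulation loop with a closed form: a capped triangular sum for positive initial velocity and a plain product otherwise.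
import Mathlib
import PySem

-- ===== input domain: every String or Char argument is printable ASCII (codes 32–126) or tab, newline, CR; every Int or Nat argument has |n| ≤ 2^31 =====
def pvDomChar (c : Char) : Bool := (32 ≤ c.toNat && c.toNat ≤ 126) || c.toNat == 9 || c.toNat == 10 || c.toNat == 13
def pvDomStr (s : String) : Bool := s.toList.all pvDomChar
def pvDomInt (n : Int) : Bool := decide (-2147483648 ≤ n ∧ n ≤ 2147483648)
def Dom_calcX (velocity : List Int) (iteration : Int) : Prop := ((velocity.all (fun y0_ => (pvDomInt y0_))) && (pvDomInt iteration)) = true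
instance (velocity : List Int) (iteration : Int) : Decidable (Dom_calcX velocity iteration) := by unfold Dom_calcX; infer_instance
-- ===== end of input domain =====

-- B replaces A's per-step simulation loop with a closed-form capped triangular sum (same return value).


-- ===== PORT A =====
-- velocity[0] raises IndexError on []: Pre_calcX excludes that; inside Pre_ the getD default is never used.
def calcX (velocity : List Int) (iteration : Int) : Int :=
  ((PySem.List.pyRange 0 iteration 1).foldl
    (fun (s : Int × Int) _ => (s.1 + s.2, if s.2 > 0 then s.2 - 1 else s.2))
    (0, PySem.List.pyGetD velocity 0 0)).1

-- ===== PORT B =====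
def calcX_alt (velocity : List Int) (iteration : Int) : Int :=
  let v := PySem.List.pyGetD velocity 0 0
  let n : Int := if iteration > 0 then iteration else 0
  if v ≤ 0 then v * n
  else
    let m := if n < v then n else v
    m * v - PySem.Int.floordiv (m * (m - 1)) 2

-- ===== PRECONDITION & SPEC =====
-- Pre_ excludes only the empty list, on which A raises IndexError (velocity[0]).
def Pre_calcX (velocity : List Int) (iteration : Int) : Prop := velocity ≠ []
instance (velocity : List Int) (iteration : Int) : Decidable (Pre_calcX velocity iteration) := by unfold Pre_calcX; infer_instance
def pvWitness_calcX : List Int × Int := ([6], 10)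
def Spec_calcX (velocity : List Int) (iteration : Int) (out : Int) : Prop := out = calcX_alt velocity iteration
instance (velocity : List Int) (iteration : Int) (out : Int) : Decidable (Spec_calcX velocity iteration out) := by unfold Spec_calcX; infer_instance

-- ===== CLAIM (what is proved, stated in full; the proofs are below) =====
def Claim_equal_calcX : Prop := ∀ (velocity : List Int) (iteration : Int), Dom_calcX velocity iteration → Pre_calcX velocity iteration → Spec_calcX velocity iteration (calcX velocity iteration)

-- ===== LEMMAS AND PROOFS =====

-- Nat-indexed model of A's loop body iterated n times from state (x, i), returning x.
def pvLoop (n : Nat) (x i : Int) : Int :=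
  match n with
  | 0 => x
  | n + 1 => pvLoop n (x + i) (if i > 0 then i - 1 else i)

lemma pvLoop_shift (n : Nat) (x i : Int) : pvLoop n x i = x + pvLoop n 0 i := by
  induction n generalizing x i with
  | zero => simp [pvLoop]
  | succ n ih =>
    simp only [pvLoop]
    rw [ih, ih (0 + i)]
    ring

lemma foldl_eq_pvLoop (l : List Int) (x i : Int) :
    (l.foldl (fun (s : Int × Int) _ => (s.1 + s.2, if s.2 > 0 then s.2 - 1 else s.2)) (x, i)).1
      = pvLoop l.length x i := by
  induction l generalizing x i with
  | nil => simp [pvLoop]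
  | cons a t ih => simp [List.foldl, pvLoop, ih]

lemma even_half (a b : Int) (h : a = 2 * b) : a / 2 = b := by
  subst h
  exact Int.mul_ediv_cancel_left b (by norm_num)

-- closed form of the loop
lemma pvLoop_closed (n : Nat) (i : Int) :
    pvLoop n 0 i =
      if i ≤ 0 then i * n
      else (if (n : Int) < i then (n : Int) else i) * i
            - ((if (n : Int) < i then (n : Int) else i) * ((if (n : Int) < i then (n : Int) else i) - 1)) / 2 := by
  induction n generalizing i with
  | zero =>
    by_cases hi : i ≤ 0
    · simp [pvLoop, hi]
    · have h0 : ((0 : Nat) : Int) < i := by push_cast; omega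
      rw [pvLoop, if_neg hi, if_pos h0]
      norm_num
  | succ n ih =>
    simp only [pvLoop]
    rw [pvLoop_shift]
    by_cases hi : i ≤ 0
    · have hng : ¬ (0 : Int) < i := by omega
      simp only [hng, if_false, if_pos hi]
      rw [ih i, if_pos hi]
      push_cast
      ring
    · have hipos : (0 : Int) < i := by omega
      simp only [hipos, if_true, if_neg hi]
      rw [ih (i - 1)]
      push_cast
      by_cases h1 : i - 1 ≤ 0
      · have hi1 : i = 1 := by omega
        subst hi1
        have hm : ¬ ((n : Int) + 1 < 1) := by omega
        rw [if_neg hm]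
        norm_num
      · rw [if_neg h1]
        by_cases hn : (n : Int) < i - 1
        · have hm : (n : Int) + 1 < i := by omega
          rw [if_pos hn, if_pos hm]
          obtain ⟨a, ha⟩ := Int.even_mul_succ_self ((n : Int) - 1)
          obtain ⟨b, hb⟩ := Int.even_mul_succ_self (n : Int)
          have ha' : (n : Int) * ((n : Int) - 1) / 2 = a := by
            apply even_half; rw [two_mul, ← ha]; ring
          have hb' : ((n : Int) + 1) * ((n : Int) + 1 - 1) / 2 = b := by
            apply even_half; rw [two_mul, ← hb]; ring
          rw [ha', hb']
          have hr1 : ((n : Int) + 1) * i - (i + (n : Int) * (i - 1)) = (n : Int) := by ring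
          have hr2 : (b : Int) - a = (n : Int) := by
            have h3 : ((n : Int)) * ((n : Int) + 1) = ((n : Int) - 1) * ((n : Int) - 1 + 1) + 2 * (n : Int) := by ring
            rw [h3] at hb
            omega
          linarith
        · have hm : ¬ ((n : Int) + 1 < i) := by omega
          rw [if_neg hn, if_neg hm]
          obtain ⟨a, ha⟩ := Int.even_mul_succ_self (i - 2)
          obtain ⟨b, hb⟩ := Int.even_mul_succ_self (i - 1)
          have ha' : (i - 1) * (i - 1 - 1) / 2 = a := by
            apply even_half; rw [two_mul, ← ha]; ring
          have hb' : i * (i - 1) / 2 = b := by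
            apply even_half; rw [two_mul, ← hb]; ring
          rw [ha', hb']
          have hr1 : i * i - (i + (i - 1) * i) = 0 := by ring
          have hr2 : b - a = i - 1 := by
            have h3 : (i - 1) * (i - 1 + 1) = (i - 2) * (i - 2 + 1) + 2 * (i - 1) := by ring
            rw [h3] at hb
            omega
          linarith

lemma calcX_eq (velocity : List Int) (iteration : Int) :
    calcX velocity iteration = calcX_alt velocity iteration := by
  unfold calcX calcX_alt
  dsimp only
  rw [foldl_eq_pvLoop, PySem.List.length_pyRange_one, pvLoop_closed,
      PySem.Int.floordiv_eq_ediv_of_pos (by norm_num)]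
  have hn : (((iteration - 0).toNat : Nat) : Int) = (if iteration > 0 then iteration else 0) := by
    split <;> omega
  rw [hn]
-- ===== VERDICT (by name: the statement is the Claim_ definition above) =====
theorem calcX_spec : Claim_equal_calcX := by
  intro v it _ _
  unfold Spec_calcX
  exact calcX_eq v it
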